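-- pv_equiv track=rewrite | github.com/Prachi15600/Placement-Preparation-Module | 2064-minimized-maximum-of-products-distributed-to-any-store/2064-minimized-maximum-of-products-distributed-to-any-store.py | minimizedMaximum
-- ===== SOURCE A (Python) =====
-- from typing import List
--
-- def minimizedMaximum(N: int, quantities: List[int]) -> int:
--
--     def good(val):
--         total = 0
--         for q in quantities:
--             groups = q // val + int(q % val > 0)
--             total += groups
--             if total > N:
--                 return False
--         return True
--
--
--
--
--     l, r = 1, max(quantities)
--
--     while l < r:
--         mid = (l + r) // 2
--         if good(mid):
--             r = mid
--         else:
--             l = mid + 1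
--
--     return l
-- ===== SOURCE B (Python) =====
-- def minimizedMaximum(N, quantities):
--     # Recursive binary search; feasibility checked by comparing the maximum
--     # running prefix of ceil-loads (ceil via -(-q // val)) against N.
--     def maxload(val):
--         t, m = 0, None
--         for q in quantities:
--             t += -(-q // val)
--             if m is None or t > m:
--                 m = t
--         return m
--
--     def search(lo, hi):
--         if lo >= hi:
--             return lo
--         mid = (lo + hi) // 2
--         if maxload(mid) <= N:
--             return search(lo, mid)
--         return search(mid + 1, hi)
--
--     return search(1, max(quantities))
-- ===== Notes on version B (the rewrite author's own statement) =====
-- stated objective: alternative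
-- what changed: Replaces A's iterative while-loop binary search with a recursive one, and replaces good()'s early-exit running group counter with a single max-prefix-load pass (ceil computed as -(-q//val)) compared against N.
-- outside the precondition, e.g. on minimizedMaximum(4, []): A raises ValueError, B raises ValueError
import Mathlib
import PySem

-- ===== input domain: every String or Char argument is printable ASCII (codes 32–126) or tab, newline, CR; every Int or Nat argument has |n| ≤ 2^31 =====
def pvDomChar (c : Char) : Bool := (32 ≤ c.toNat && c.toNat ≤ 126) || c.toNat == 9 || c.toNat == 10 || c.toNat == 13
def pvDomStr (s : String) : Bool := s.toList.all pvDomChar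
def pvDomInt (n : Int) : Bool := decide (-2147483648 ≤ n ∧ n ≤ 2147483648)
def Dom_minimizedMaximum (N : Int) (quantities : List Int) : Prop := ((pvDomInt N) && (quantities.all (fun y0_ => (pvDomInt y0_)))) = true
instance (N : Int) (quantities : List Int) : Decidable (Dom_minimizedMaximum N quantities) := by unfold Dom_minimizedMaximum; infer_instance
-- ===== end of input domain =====

-- B replaces A's early-exit feasibility counter and while-loop by a max-prefix-load
-- pass and a recursive binary search (objective: alternative; return value only).

-- ===== PORT A =====
-- good's loop: total accumulator, early 'return False' when total > N
def aGoodGo (N val : Int) (total : Int) : List Int → Bool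
  | [] => true
  | q :: rest =>
    let groups := PySem.Int.floordiv q val + (if PySem.Int.mod q val > 0 then (1 : Int) else 0)
    let total' := total + groups
    if total' > N then false else aGoodGo N val total' rest

-- A's while-loop (binary search); fuel = initial interval width (r - l).toNat,
-- a totality guard only: the loop shrinks the interval by at least 1 per step
def aLoop (N : Int) (qs : List Int) : Nat → Int → Int → Int
  | 0, l, _ => l
  | fuel + 1, l, r =>
    if l < r then
      let mid := PySem.Int.floordiv (l + r) 2
      if aGoodGo N mid 0 qs then aLoop N qs fuel l mid else aLoop N qs fuel (mid + 1) r
    else l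

def minimizedMaximum (N : Int) (quantities : List Int) : Int :=
  match PySem.List.max? quantities (fun x => x) with
  | some r => aLoop N quantities (r - 1).toNat 1 r
  | none => 0   -- Python raises ValueError on max([]); excluded by Pre_

-- ===== PORT B =====
-- maxload's loop: running total of ceil-loads -(-q // val) and running max m
def bGo (val : Int) (t : Int) (m : Option Int) : List Int → Option Int
  | [] => m
  | q :: rest =>
    let t' := t + (-(PySem.Int.floordiv (-q) val))
    let m' := match m with
      | none => some t'
      | some mv => if t' > mv then some t' else some mv
    bGo val t' m' rest

def bMaxload (val : Int) (qs : List Int) : Option Int := bGo val 0 none qs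

-- recursive binary search; 'none' is unreachable under Pre_ (Python's maxload
-- never returns None on nonempty quantities), ported as returning lo
def bSearch (N : Int) (qs : List Int) : Nat → Int → Int → Int
  | 0, lo, _ => lo
  | fuel + 1, lo, hi =>
    if lo ≥ hi then lo
    else
      let mid := PySem.Int.floordiv (lo + hi) 2
      match bMaxload mid qs with
      | some m => if m ≤ N then bSearch N qs fuel lo mid else bSearch N qs fuel (mid + 1) hi
      | none => lo

def minimizedMaximum_alt (N : Int) (quantities : List Int) : Int :=
  match PySem.List.max? quantities (fun x => x) with
  | some r => bSearch N quantities (r - 1).toNat 1 r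
  | none => 0   -- Python raises ValueError on max([]); excluded by Pre_

-- ===== PRECONDITION & SPEC =====
-- A raises ValueError (max of empty sequence) exactly when quantities = []
def Pre_minimizedMaximum (N : Int) (quantities : List Int) : Prop := quantities ≠ []
instance (N : Int) (quantities : List Int) : Decidable (Pre_minimizedMaximum N quantities) := by unfold Pre_minimizedMaximum; infer_instance
def pvWitness_minimizedMaximum : Int × List Int := (4, [11, 6])

def Spec_minimizedMaximum (N : Int) (quantities : List Int) (out : Int) : Prop := out = minimizedMaximum_alt N quantities
instance (N : Int) (quantities : List Int) (out : Int) : Decidable (Spec_minimizedMaximum N quantities out) := by unfold Spec_minimizedMaximum; infer_instance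

-- ===== CLAIM (what is proved, stated in full; the proofs are below) =====
def Claim_equal_minimizedMaximum : Prop := ∀ (N : Int) (quantities : List Int), Dom_minimizedMaximum N quantities → Pre_minimizedMaximum N quantities → Spec_minimizedMaximum N quantities (minimizedMaximum N quantities)

-- ===== LEMMAS AND PROOFS =====

-- ceiling division: -(-q // val) equals A's q // val + (q % val > 0) for val ≥ 1
theorem ceil_eq (q val : Int) (hv : 1 ≤ val) :
    -(PySem.Int.floordiv (-q) val) =
      PySem.Int.floordiv q val + (if PySem.Int.mod q val > 0 then (1 : Int) else 0) := by
  have hd : PySem.Int.floordiv q val = q / val := PySem.Int.floordiv_eq_ediv_of_pos (by omega)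
  have hmm : PySem.Int.mod q val = q % val := PySem.Int.mod_eq_emod_of_pos (by omega)
  rw [PySem.Int.neg_floordiv_neg_eq_iff_of_pos (by omega), hd, hmm]
  have h1 : val * (q / val) + q % val = q := Int.mul_ediv_add_emod q val
  have h2 : 0 ≤ q % val := Int.emod_nonneg q (by omega)
  have h3 : q % val < val := Int.emod_lt_of_pos q (by omega)
  constructor <;> split <;> nlinarith

-- B's running-max fold tracks A's early-exit counter: the final max is ≤ N
-- exactly when the seed m is ≤ N and A's good-loop returns true
theorem go_eq (N val : Int) (hv : 1 ≤ val) :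
    ∀ (qs : List Int) (t m : Int), ∃ x, bGo val t (some m) qs = some x ∧
      (decide (x ≤ N) = (decide (m ≤ N) && aGoodGo N val t qs)) := by
  intro qs
  induction qs with
  | nil => intro t m; exact ⟨m, rfl, by simp [aGoodGo]⟩
  | cons q rest ih =>
    intro t m
    have hc := ceil_eq q val hv
    simp only [bGo, aGoodGo, hc]
    set t' := t + (PySem.Int.floordiv q val + (if PySem.Int.mod q val > 0 then (1 : Int) else 0)) with ht'
    by_cases hmt : t' > m
    · simp only [if_pos hmt]
      obtain ⟨x, hx, he⟩ := ih t' t'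
      refine ⟨x, hx, ?_⟩
      rw [he]
      by_cases hN : t' > N
      · simp [hN, show ¬ t' ≤ N by omega]
      · simp [hN, show t' ≤ N by omega, show m ≤ N by omega]
    · simp only [if_neg hmt]
      obtain ⟨x, hx, he⟩ := ih t' m
      refine ⟨x, hx, ?_⟩
      rw [he]
      by_cases hN : t' > N
      · simp [hN, show ¬ m ≤ N by omega]
      · simp [hN]

-- on a nonempty list, B's condition 'maxload val ≤ N' is A's good(val)
theorem maxload_eq (N val : Int) (hv : 1 ≤ val) (q : Int) (rest : List Int) :
    ∃ x, bMaxload val (q :: rest) = some x ∧ decide (x ≤ N) = aGoodGo N val 0 (q :: rest) := by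
  have hc := ceil_eq q val hv
  obtain ⟨x, hx, he⟩ := go_eq N val hv rest
    (0 + (-(PySem.Int.floordiv (-q) val))) (0 + (-(PySem.Int.floordiv (-q) val)))
  refine ⟨x, by simpa [bMaxload, bGo] using hx, ?_⟩
  rw [he, hc]
  simp only [aGoodGo]
  set t1 := (0 : Int) + (PySem.Int.floordiv q val + (if PySem.Int.mod q val > 0 then (1 : Int) else 0))
  by_cases hN : t1 > N
  · simp [hN, show ¬ t1 ≤ N by omega]
  · simp [hN, show t1 ≤ N by omega]

-- the two binary searches coincide step by step (fuel covers the interval width)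
theorem loop_eq (N : Int) (q : Int) (rest : List Int) :
    ∀ (fuel : ℕ) (l r : Int), (r - l).toNat ≤ fuel → 1 ≤ l →
      aLoop N (q :: rest) fuel l r = bSearch N (q :: rest) fuel l r := by
  intro fuel
  induction fuel with
  | zero => intro l r _ _; rfl
  | succ fuel ih =>
    intro l r hf hl
    simp only [aLoop, bSearch]
    by_cases h : l < r
    · simp only [if_pos h, if_neg (show ¬ l ≥ r by omega)]
      have hm : PySem.Int.floordiv (l + r) 2 = (l + r) / 2 :=
        PySem.Int.floordiv_eq_ediv_of_pos (by omega)
      have hv : 1 ≤ PySem.Int.floordiv (l + r) 2 := by rw [hm]; omega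
      obtain ⟨x, hx, he⟩ := maxload_eq N (PySem.Int.floordiv (l + r) 2) hv q rest
      simp only [hx]
      by_cases hg : aGoodGo N (PySem.Int.floordiv (l + r) 2) 0 (q :: rest) = true
      · have hxN : x ≤ N := of_decide_eq_true (he.trans hg)
        rw [if_pos hg, if_pos hxN]
        exact ih l _ (by rw [hm] at *; omega) hl
      · have hxN : ¬ x ≤ N := by
          rw [Bool.not_eq_true] at hg
          exact of_decide_eq_false (he.trans hg)
        rw [if_neg hg, if_neg hxN]
        exact ih _ r (by rw [hm] at *; omega) (by rw [hm] at *; omega)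
    · simp [if_neg h, if_pos (show l ≥ r by omega)]

-- ===== VERDICT (by name: the statement is the Claim_ definition above) =====
theorem minimizedMaximum_spec : Claim_equal_minimizedMaximum := by
  intro N quantities _ hpre
  unfold Spec_minimizedMaximum minimizedMaximum minimizedMaximum_alt
  cases hq : PySem.List.max? quantities (fun x => x) with
  | none => rfl
  | some r =>
    cases quantities with
    | nil => exact absurd rfl hpre
    | cons q rest => exact loop_eq N q rest _ 1 r (by omega) le_rfl
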